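-- pv_equiv track=rewrite | github.com/jramaswami/Advent-Of-Code-2016 | 11/B/python/rtg_b.py | buildings_generator
-- ===== SOURCE A (Python) =====
-- from itertools import combinations, chain
--
-- def is_generator(elem):
--     """
--     Returns True if elem is a generator.
--     """
--     return elem % 2 == 1
--
-- def chip_and_generator_together(chip, building):
--     """
--     Returns true if the floor has the
--     matching generator for the given chip.
--     """
--     matching_generator = chip - 1
--     return building[matching_generator] == building[chip]
--
-- def floor_has_generators(floor, building):
--     """
--     Returns True if the given floor has generators on it.
--     All generators are odd numbered, if there are any
--     odd numbers in floor then there are generators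
--     on the floor.
--     """
--     for elem, loc in enumerate(building):
--         if loc == floor and is_generator(elem):
--             return True
--
-- def building_is_valid(building):
--     """
--     Returns True if building is a valid one.  This
--     means that if there are generators, each chip on
--     the floor has its corresponding generator.
--     """
--     # for each chip (even numbers)
--     for chip in range(2, len(building), 2):
--         loc = building[chip]
--         if floor_has_generators(loc, building) \
--         and not chip_and_generator_together(chip, building):
--             return False
--     return True
--
-- def move_to(elems, floor, building):
--     """
--     Move elements to given floor,
--     returning a new floor.
--     """
--     new_building = list(building)
--     for elem in elems:
--         new_building[elem] = floor
--     # move elevator too!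
--     new_building[0] = floor
--     return tuple(new_building)
--
-- def buildings_generator(building):
--     """
--     Generate possible next building buildings.
--     """
--     floor = building[0]
--     elems = [e for e, loc in enumerate(building) if e > 0 and loc == floor]
--
--     choose1_it = combinations(elems, 1)
--     choose2_it = combinations(elems, 2)
--     for movers in chain(choose1_it, choose2_it):
--         if floor > 0:
--             # move them down one floor
--             new_building = move_to(movers, floor - 1, building)
--             if building_is_valid(new_building):
--                 yield new_building
--         if floor < 3:
--             # move them up one floor
--             new_building = move_to(movers, floor + 1, building)
--             if building_is_valid(new_building):
--                 yield new_building
-- ===== SOURCE B (Python) =====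
-- def _gens_on(building, f):
--     """Indices of generators currently on floor f."""
--     return [g for g, loc in enumerate(building) if g % 2 == 1 and loc == f]
--
--
-- def _chips_on(building, f):
--     """Indices of chips currently on floor f."""
--     return [c for c, loc in enumerate(building)
--             if c >= 2 and c % 2 == 0 and loc == f]
--
--
-- def _gen_floors(building):
--     """Floors that contain at least one generator."""
--     return [loc for g, loc in enumerate(building) if g % 2 == 1]
--
--
-- def _bad_floors(building):
--     """Floors already broken: a chip there lacks its generator while
--     some generator is present."""
--     gen_floors = _gen_floors(building)
--     return [loc for c, loc in enumerate(building)
--             if c >= 2 and c % 2 == 0 and loc in gen_floors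
--             and building[c - 1] != loc]
--
--
-- def _ok(gs, cs):
--     """A floor with generator list gs and chip list cs is safe."""
--     gset = set(gs)
--     return not gs or all(c - 1 in gset for c in cs)
--
--
-- def buildings_generator(building):
--     """
--     Generate possible next building states.  Each candidate move is
--     validated incrementally from per-floor index lists computed once:
--     only the source and destination floors are re-checked (plus the
--     precomputed list of already-broken floors); the new building is
--     built only when it is emitted.
--     """
--     floor = building[0]
--     bad_floors = _bad_floors(building)
--     gens_here = _gens_on(building, floor)
--     chips_here = _chips_on(building, floor)
--     elems = [e for e, loc in enumerate(building) if e > 0 and loc == floor]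
--     targets = ([floor - 1] if floor > 0 else []) + ([floor + 1] if floor < 3 else [])
--     pre = [(t, _gens_on(building, t), _chips_on(building, t),
--             all(f == floor or f == t for f in bad_floors))
--            for t in targets]
--
--     def candidates(movers):
--         out = []
--         gf = [g for g in gens_here if g not in movers]
--         cf = [c for c in chips_here if c not in movers]
--         for t, gens_t, chips_t, other_ok in pre:
--             gt = gens_t + [m for m in movers if m % 2 == 1]
--             ct = chips_t + [m for m in movers if m % 2 == 0]
--             if other_ok and _ok(gf, cf) and _ok(gt, ct):
--                 out.append(tuple(t if e == 0 or e in movers else loc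
--                                  for e, loc in enumerate(building)))
--         return out
--
--     for x in elems:
--         yield from candidates([x])
--     rest = elems
--     while rest:
--         x, rest = rest[0], rest[1:]
--         for y in rest:
--             yield from candidates([x, y])
-- ===== Notes on version B (the rewrite author's own statement) =====
-- stated objective: alternative
-- what changed: B validates each candidate move incrementally: per-floor generator/chip index lists and the list of already-broken floors are computed once per call, and a move is checked by adjusting only the source and destination floors (the new building is never rescanned); pairs of movers are enumerated by a peel-head while-loop instead of itertools.combinations, and emitted buildings are rebuilt by one indexed comprehension instead of copy-then-assign.
import Mathlib
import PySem

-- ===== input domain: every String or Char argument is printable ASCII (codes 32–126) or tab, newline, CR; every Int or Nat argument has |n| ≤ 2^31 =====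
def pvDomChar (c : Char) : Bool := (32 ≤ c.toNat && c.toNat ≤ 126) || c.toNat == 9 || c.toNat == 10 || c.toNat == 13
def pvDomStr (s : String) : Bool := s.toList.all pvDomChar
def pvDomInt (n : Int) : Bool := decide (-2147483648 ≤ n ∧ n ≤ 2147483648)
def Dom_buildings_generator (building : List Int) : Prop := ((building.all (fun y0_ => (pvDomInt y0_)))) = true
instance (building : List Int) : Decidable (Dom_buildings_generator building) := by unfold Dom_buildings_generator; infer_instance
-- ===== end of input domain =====

-- B validates each candidate move incrementally (precomputed per-floor index lists and
-- already-broken floors; only the two affected floors are re-checked, the new building is never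
-- scanned) and enumerates pairs by a peel-head loop instead of itertools; objective: alternative.


-- ===== PORT A =====
def pv_is_generator (elem : Int) : Bool := PySem.Int.mod elem 2 == 1

-- building[chip-1] == building[chip]; both indices are in range at every call site in A
def pv_chip_and_generator_together (chip : Int) (building : List Int) : Bool :=
  PySem.List.pyGet? building (chip - 1) == PySem.List.pyGet? building chip

-- 'for elem, loc in enumerate(building): if …: return True' — early-exit scan ≡ .any
-- (the fall-through returns Python's None, which is falsy where A uses it)
def pv_floor_has_generators (floor : Int) (building : List Int) : Bool :=
  (PySem.List.enumerate building).any fun p => p.2 == floor && pv_is_generator p.1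

-- early 'return False' of a pure per-chip test ≡ .all; chip from range(2, len, 2) is always
-- in range, so the .getD 0 default is never read
def pv_building_is_valid (building : List Int) : Bool :=
  (PySem.List.pyRange 2 (PySem.List.len building) 2).all fun chip =>
    let loc := (PySem.List.pyGet? building chip).getD 0
    !(pv_floor_has_generators loc building && !pv_chip_and_generator_together chip building)

-- new_building[elem] = floor; every index A writes is in range (pySetD is the total form)
def pv_move_to (elems : List Int) (floor : Int) (building : List Int) : List Int :=
  PySem.List.pySetD (elems.foldl (fun nb e => PySem.List.pySetD nb e floor) building) 0 floor

def buildings_generator (building : List Int) : List (List Int) :=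
  let floor := (PySem.List.pyGet? building 0).getD 0  -- nonempty by Pre_; the .getD 0 default is never read
  let elems := (PySem.List.enumerate building).filterMap fun p =>
      if p.1 > 0 && p.2 == floor then some p.1 else none
  (PySem.List.combinations elems 1 ++ PySem.List.combinations elems 2).flatMap fun movers =>
    (if floor > 0 then
        let nb := pv_move_to movers (floor - 1) building
        if pv_building_is_valid nb then [nb] else []
      else []) ++
    (if floor < 3 then
        let nb := pv_move_to movers (floor + 1) building
        if pv_building_is_valid nb then [nb] else []
      else [])

-- ===== PORT B =====
-- '[g for g, loc in enumerate(building) if g % 2 == 1 and loc == f]'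
def pv_gens_on (building : List Int) (f : Int) : List Int :=
  (PySem.List.enumerate building).filterMap fun p =>
    if PySem.Int.mod p.1 2 == 1 && p.2 == f then some p.1 else none

-- '[c for c, loc in enumerate(building) if c >= 2 and c % 2 == 0 and loc == f]'
def pv_chips_on (building : List Int) (f : Int) : List Int :=
  (PySem.List.enumerate building).filterMap fun p =>
    if p.1 ≥ 2 && PySem.Int.mod p.1 2 == 0 && p.2 == f then some p.1 else none

-- '[loc for g, loc in enumerate(building) if g % 2 == 1]'
def pv_gen_floors (building : List Int) : List Int :=
  (PySem.List.enumerate building).filterMap fun p =>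
    if PySem.Int.mod p.1 2 == 1 then some p.2 else none

-- building[c-1] with c ≥ 2 is always in range, so the .getD 0 default is never read
def pv_bad_floors (building : List Int) : List Int :=
  let gen_floors := pv_gen_floors building
  (PySem.List.enumerate building).filterMap fun p =>
    if p.1 ≥ 2 && PySem.Int.mod p.1 2 == 0 && gen_floors.contains p.2
        && !((PySem.List.pyGet? building (p.1 - 1)).getD 0 == p.2) then some p.2 else none

-- 'gset = set(gs); not gs or all(c - 1 in gset for c in cs)'
def pv_ok (gs cs : List Int) : Bool :=
  let gset := PySem.Set.ofList gs
  gs == [] || cs.all fun c => PySem.Set.contains gset (c - 1)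

-- the inner 'for t, gens_t, chips_t, other_ok in pre' loop of B's candidates()
def pv_candidates (building : List Int) (pre : List (Int × List Int × List Int × Bool))
    (gens_here chips_here : List Int) (movers : List Int) : List (List Int) :=
  let gf := gens_here.filter fun g => !movers.contains g
  let cf := chips_here.filter fun c => !movers.contains c
  pre.flatMap fun q =>
    let gt := q.2.1 ++ movers.filter fun m => PySem.Int.mod m 2 == 1
    let ct := q.2.2.1 ++ movers.filter fun m => PySem.Int.mod m 2 == 0
    if q.2.2.2 && pv_ok gf cf && pv_ok gt ct then
      [(PySem.List.enumerate building).map fun p =>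
        if p.1 == 0 || movers.contains p.1 then q.1 else p.2]
    else []

-- 'rest = elems; while rest: x, rest = rest[0], rest[1:]; for y in rest: yield from cand([x, y])'
def pv_pairs_pass (cand : List Int → List (List Int)) : List Int → List (List Int)
  | [] => []
  | x :: rest => (rest.flatMap fun y => cand [x, y]) ++ pv_pairs_pass cand rest

def buildings_generator_alt (building : List Int) : List (List Int) :=
  let floor := (PySem.List.pyGet? building 0).getD 0  -- nonempty by Pre_; the .getD 0 default is never read
  let bad_floors := pv_bad_floors building
  let gens_here := pv_gens_on building floor
  let chips_here := pv_chips_on building floor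
  let elems := (PySem.List.enumerate building).filterMap fun p =>
      if p.1 > 0 && p.2 == floor then some p.1 else none
  let targets := (if floor > 0 then [floor - 1] else []) ++ (if floor < 3 then [floor + 1] else [])
  let pre := targets.map fun t =>
      (t, pv_gens_on building t, pv_chips_on building t,
       bad_floors.all fun f => f == floor || f == t)
  let cand := pv_candidates building pre gens_here chips_here
  (elems.flatMap fun x => cand [x]) ++ pv_pairs_pass cand elems

-- ===== PRECONDITION & SPEC =====
-- Pre_ excludes only the empty list, on which Python A raises IndexError reading the elevator floor
def Pre_buildings_generator (building : List Int) : Prop := building ≠ []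
instance (building : List Int) : Decidable (Pre_buildings_generator building) := by
  unfold Pre_buildings_generator; infer_instance

def pvWitness_buildings_generator : List Int := [0, 0, 0]

def Spec_buildings_generator (building : List Int) (out : List (List Int)) : Prop := out = buildings_generator_alt building
instance (building : List Int) (out : List (List Int)) : Decidable (Spec_buildings_generator building out) := by unfold Spec_buildings_generator; infer_instance

-- ===== CLAIM (what is proved, stated in full; the proofs are below) =====
def Claim_equal_buildings_generator : Prop := ∀ (building : List Int), Dom_buildings_generator building → Pre_buildings_generator building → Spec_buildings_generator building (buildings_generator building)

-- ===== LEMMAS AND PROOFS =====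

def pvSpecValid (L : List Int) : Prop :=
  ∀ c : Nat, c < L.length → 2 ≤ c → c % 2 = 0 →
    (∃ g : Nat, g < L.length ∧ g % 2 = 1 ∧ L.getD g 0 = L.getD c 0) → L.getD (c - 1) 0 = L.getD c 0

-- cast bridge: Python's k % 2 on a Nat-valued index
theorem pv_mod2_nat (k : Nat) : PySem.Int.mod (k : Int) 2 = ((k % 2 : Nat) : Int) := by
  have := PySem.Int.mod_natCast k 2
  exact_mod_cast this

theorem pv_fhg_iff (f : Int) (L : List Int) :
    pv_floor_has_generators f L = true ↔ ∃ g : Nat, g < L.length ∧ g % 2 = 1 ∧ L.getD g 0 = f := by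
  unfold pv_floor_has_generators pv_is_generator
  rw [List.any_eq_true]
  constructor
  · rintro ⟨p, hp, hcond⟩
    rw [PySem.List.mem_enumerate_iff] at hp
    obtain ⟨k, hk, rfl⟩ := hp
    simp only [zero_add, Bool.and_eq_true, beq_iff_eq, pv_mod2_nat] at hcond
    exact ⟨k, hk, by omega, by rw [List.getD_eq_getElem _ _ hk]; exact hcond.1⟩
  · rintro ⟨g, hg, hodd, hval⟩
    refine ⟨((g : Int), L[g]), ?_, ?_⟩
    · rw [PySem.List.mem_enumerate_iff]; exact ⟨g, hg, by simp⟩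
    · simp only [zero_add, Bool.and_eq_true, beq_iff_eq, pv_mod2_nat]
      exact ⟨by rw [List.getD_eq_getElem _ _ hg] at hval; exact hval, by omega⟩

theorem pv_valid_iff (L : List Int) : pv_building_is_valid L = true ↔ pvSpecValid L := by
  unfold pv_building_is_valid
  rw [List.all_eq_true]
  have hget : ∀ c : Nat, c < L.length → PySem.List.pyGet? L (c : Int) = some (L.getD c 0) := by
    intro c hc
    rw [PySem.List.pyGet?_natCast, List.getElem?_eq_getElem hc, List.getD_eq_getElem _ _ hc]
  constructor
  · intro h c hc h2 heven hgen
    have hmem : (c : Int) ∈ PySem.List.pyRange 2 (PySem.List.len L) 2 := by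
      rw [PySem.List.mem_pyRange_iff_of_pos (by norm_num)]
      exact ⟨by exact_mod_cast h2, by rw [PySem.List.len_eq]; exact_mod_cast hc, by omega⟩
    have hx := h _ hmem
    simp only [hget c hc, Option.getD_some, Bool.not_eq_eq_eq_not, Bool.not_true,
      Bool.and_eq_false_iff] at hx
    rcases hx with hno | hyes
    · rw [(pv_fhg_iff _ _).mpr hgen] at hno; cases hno
    · unfold pv_chip_and_generator_together at hyes
      rw [Bool.not_false, beq_iff_eq, show ((c : Int) - 1) = ((c - 1 : Nat) : Int) by omega,
        hget _ (by omega), hget _ hc] at hyes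
      exact Option.some.inj hyes
  · intro hs x hx
    rw [PySem.List.mem_pyRange_iff_of_pos (by norm_num)] at hx
    obtain ⟨h2, hlt, hdvd⟩ := hx
    rw [PySem.List.len_eq] at hlt
    have hxc : x = ((x.toNat : Nat) : Int) := by omega
    have hc : x.toNat < L.length := by omega
    rw [hxc, hget _ hc]
    simp only [Option.getD_some, Bool.not_eq_eq_eq_not, Bool.not_true, Bool.and_eq_false_iff]
    by_cases hgen : pv_floor_has_generators (L.getD x.toNat 0) L = true
    · right
      unfold pv_chip_and_generator_together
      rw [Bool.not_false, beq_iff_eq, ← hxc, show (x - 1) = ((x.toNat - 1 : Nat) : Int) by omega,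
        hget _ (by omega), hxc, hget _ hc]
      exact congrArg some (hs x.toNat hc (by omega) (by omega) ((pv_fhg_iff _ _).mp hgen))
    · left; simpa using hgen

theorem pv_mem_gens_on (b : List Int) (f x : Int) :
    x ∈ pv_gens_on b f ↔ ∃ g : Nat, g < b.length ∧ g % 2 = 1 ∧ b.getD g 0 = f ∧ x = (g : Int) := by
  unfold pv_gens_on
  simp only [List.mem_filterMap, PySem.List.mem_enumerate_iff]
  constructor
  · rintro ⟨p, ⟨k, hk, rfl⟩, hp⟩
    simp only [zero_add] at hp
    split at hp
    · rename_i hcond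
      simp only [Bool.and_eq_true, beq_iff_eq, pv_mod2_nat] at hcond
      exact ⟨k, hk, by omega, by rw [List.getD_eq_getElem _ _ hk]; exact hcond.2,
        (Option.some.inj hp).symm⟩
    · cases hp
  · rintro ⟨g, hg, hodd, hval, rfl⟩
    refine ⟨((g : Int), b[g]), ⟨g, hg, by simp⟩, ?_⟩
    rw [List.getD_eq_getElem _ _ hg] at hval
    simp only [pv_mod2_nat, hodd, hval]
    norm_num

theorem pv_mem_chips_on (b : List Int) (f x : Int) :
    x ∈ pv_chips_on b f ↔
      ∃ c : Nat, c < b.length ∧ 2 ≤ c ∧ c % 2 = 0 ∧ b.getD c 0 = f ∧ x = (c : Int) := by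
  unfold pv_chips_on
  simp only [List.mem_filterMap, PySem.List.mem_enumerate_iff]
  constructor
  · rintro ⟨p, ⟨k, hk, rfl⟩, hp⟩
    simp only [zero_add] at hp
    split at hp
    · rename_i hcond
      simp only [Bool.and_eq_true, beq_iff_eq, pv_mod2_nat, decide_eq_true_eq] at hcond
      refine ⟨k, hk, by exact_mod_cast hcond.1.1, by omega,
        by rw [List.getD_eq_getElem _ _ hk]; exact hcond.2, (Option.some.inj hp).symm⟩
    · cases hp
  · rintro ⟨c, hc, h2, heven, hval, rfl⟩
    refine ⟨((c : Int), b[c]), ⟨c, hc, by simp⟩, ?_⟩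
    rw [List.getD_eq_getElem _ _ hc] at hval
    simp only [pv_mod2_nat, hval, ge_iff_le]
    have : (2 : Int) ≤ (c : Int) := by exact_mod_cast h2
    simp [this, heven]

theorem pv_mem_gen_floors (b : List Int) (f : Int) :
    f ∈ pv_gen_floors b ↔ ∃ g : Nat, g < b.length ∧ g % 2 = 1 ∧ b.getD g 0 = f := by
  unfold pv_gen_floors
  simp only [List.mem_filterMap, PySem.List.mem_enumerate_iff]
  constructor
  · rintro ⟨p, ⟨k, hk, rfl⟩, hp⟩
    simp only [zero_add] at hp
    split at hp
    · rename_i hcond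
      simp only [beq_iff_eq, pv_mod2_nat] at hcond
      exact ⟨k, hk, by omega, by rw [List.getD_eq_getElem _ _ hk]; exact Option.some.inj hp⟩
    · cases hp
  · rintro ⟨g, hg, hodd, hval⟩
    refine ⟨((g : Int), b[g]), ⟨g, hg, by simp⟩, ?_⟩
    rw [List.getD_eq_getElem _ _ hg] at hval
    simp only [pv_mod2_nat, hodd, hval]
    norm_num

theorem pv_mem_bad_floors (b : List Int) (f : Int) :
    f ∈ pv_bad_floors b ↔
      ∃ c : Nat, c < b.length ∧ 2 ≤ c ∧ c % 2 = 0 ∧ b.getD c 0 = f ∧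
        (∃ g : Nat, g < b.length ∧ g % 2 = 1 ∧ b.getD g 0 = f) ∧ b.getD (c - 1) 0 ≠ f := by
  unfold pv_bad_floors
  simp only [List.mem_filterMap, PySem.List.mem_enumerate_iff]
  constructor
  · rintro ⟨p, ⟨k, hk, rfl⟩, hp⟩
    simp only [zero_add] at hp
    split at hp
    · rename_i hcond
      simp only [Bool.and_eq_true, beq_iff_eq, pv_mod2_nat, decide_eq_true_eq,
        Bool.not_eq_eq_eq_not, Bool.not_true, beq_eq_false_iff_ne, ne_eq] at hcond
      obtain ⟨⟨⟨hge, hev⟩, hgen⟩, hne⟩ := hcond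
      have hval := Option.some.inj hp
      have h2 : 2 ≤ k := by exact_mod_cast hge
      refine ⟨k, hk, h2, by omega, by rw [List.getD_eq_getElem _ _ hk]; exact hval, ?_, ?_⟩
      · rw [← hval, ← pv_mem_gen_floors]
        exact List.contains_iff_mem.mp hgen
      · rw [show ((k : Int) - 1) = ((k - 1 : Nat) : Int) by omega, PySem.List.pyGet?_natCast,
          List.getElem?_eq_getElem (by omega : k - 1 < b.length)] at hne
        rw [List.getD_eq_getElem _ _ (by omega : k - 1 < b.length)]
        simpa [hval] using hne
    · cases hp
  · rintro ⟨c, hc, h2, heven, hval, hgen, hne⟩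
    refine ⟨((c : Int), b[c]), ⟨c, hc, by simp⟩, ?_⟩
    rw [List.getD_eq_getElem _ _ hc] at hval
    have hcont : (pv_gen_floors b).contains b[c] = true :=
      List.contains_iff_mem.mpr ((pv_mem_gen_floors b _).mpr (hval ▸ hgen))
    have hne' : (PySem.List.pyGet? b ((c : Int) - 1)).getD 0 ≠ b[c] := by
      rw [show ((c : Int) - 1) = ((c - 1 : Nat) : Int) by omega, PySem.List.pyGet?_natCast,
        List.getElem?_eq_getElem (by omega : c - 1 < b.length)]
      rw [List.getD_eq_getElem _ _ (by omega : c - 1 < b.length)] at hne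
      simpa [hval] using hne
    simp only [pv_mod2_nat, ge_iff_le, hval]
    have h2i : (2 : Int) ≤ (c : Int) := by exact_mod_cast h2
    simp [h2i, heven]
    exact ⟨(pv_mem_gen_floors b f).mpr hgen, fun h => hne' (hval ▸ h)⟩

theorem pv_ok_iff (gs cs : List Int) :
    pv_ok gs cs = true ↔ (gs = [] ∨ ∀ c ∈ cs, (c - 1) ∈ gs) := by
  unfold pv_ok
  simp [List.all_eq_true, PySem.Set.mem_ofList]

def pvNB (b : List Int) (t : Int) (M : List Int) : List Int :=
  (PySem.List.enumerate b).map fun p => if p.1 == 0 || M.contains p.1 then t else p.2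

theorem pv_NB_length (b : List Int) (t : Int) (M : List Int) :
    (pvNB b t M).length = b.length := by
  unfold pvNB
  rw [List.length_map, PySem.List.length_enumerate]

theorem pv_NB_getD (b : List Int) (t : Int) (M : List Int) (j : Nat) (hj : j < b.length) :
    (pvNB b t M).getD j 0 = if j = 0 ∨ (j : Int) ∈ M then t else b.getD j 0 := by
  unfold pvNB
  rw [List.getD_eq_getElem _ _ (by rw [List.length_map, PySem.List.length_enumerate]; exact hj),
    List.getElem_map, PySem.List.getElem_enumerate]
  simp only [zero_add, Bool.or_eq_true, beq_iff_eq, Nat.cast_eq_zero, List.contains_iff_mem]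
  rw [List.getD_eq_getElem _ _ hj]

theorem pv_delta_valid (b : List Int) (floor t : Int) (M : List Int)
    (hM : ∀ m ∈ M, ∃ k : Nat, m = (k : Int) ∧ 1 ≤ k ∧ k < b.length ∧ b.getD k 0 = floor)
    (ht : t ≠ floor) :
    ((pv_bad_floors b).all (fun f => f == floor || f == t)
      && pv_ok ((pv_gens_on b floor).filter fun g => !M.contains g)
               ((pv_chips_on b floor).filter fun c => !M.contains c)
      && pv_ok (pv_gens_on b t ++ M.filter fun m => PySem.Int.mod m 2 == 1)
               (pv_chips_on b t ++ M.filter fun m => PySem.Int.mod m 2 == 0)) = true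
      ↔ pvSpecValid (pvNB b t M) := by
  set n := b.length with hn
  -- facts about members of M
  have hMk : ∀ k : Nat, (k : Int) ∈ M → 1 ≤ k ∧ k < n ∧ b.getD k 0 = floor := by
    intro k hk
    obtain ⟨k', hk', h1, h2, h3⟩ := hM _ hk
    have : k = k' := by exact_mod_cast hk'
    exact this ▸ ⟨h1, h2, h3⟩
  -- pointwise description of the new building
  have hNB1 : ∀ j : Nat, 1 ≤ j → j < n → (j : Int) ∈ M → (pvNB b t M).getD j 0 = t := by
    intro j h1 h2 h3
    rw [pv_NB_getD b t M j h2]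
    simp [h3]
  have hNB2 : ∀ j : Nat, 1 ≤ j → j < n → (j : Int) ∉ M →
      (pvNB b t M).getD j 0 = b.getD j 0 := by
    intro j h1 h2 h3
    rw [pv_NB_getD b t M j h2]
    have : ¬ j = 0 := by omega
    simp [h3, this]
  -- characterize the four adjusted per-floor lists against the NEW building
  have hGF : ∀ x : Int, x ∈ (pv_gens_on b floor).filter (fun g => !M.contains g) ↔
      ∃ g : Nat, g < n ∧ g % 2 = 1 ∧ (pvNB b t M).getD g 0 = floor ∧ x = (g : Int) := by
    intro x
    rw [List.mem_filter]
    simp only [Bool.not_eq_eq_eq_not, Bool.not_true, List.contains_eq_mem, decide_eq_false_iff_not]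
    rw [pv_mem_gens_on]
    constructor
    · rintro ⟨⟨g, hg, hodd, hval, rfl⟩, hnm⟩
      exact ⟨g, hg, hodd, by rw [hNB2 g (by omega) hg hnm]; exact hval, rfl⟩
    · rintro ⟨g, hg, hodd, hval, rfl⟩
      have hnm : (g : Int) ∉ M := by
        intro hm
        rw [hNB1 g (by omega) hg hm] at hval
        exact ht hval
      exact ⟨⟨g, hg, hodd, by rw [hNB2 g (by omega) hg hnm] at hval; exact hval, rfl⟩, hnm⟩
  have hCF : ∀ x : Int, x ∈ (pv_chips_on b floor).filter (fun c => !M.contains c) ↔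
      ∃ c : Nat, c < n ∧ 2 ≤ c ∧ c % 2 = 0 ∧ (pvNB b t M).getD c 0 = floor ∧ x = (c : Int) := by
    intro x
    rw [List.mem_filter]
    simp only [Bool.not_eq_eq_eq_not, Bool.not_true, List.contains_eq_mem, decide_eq_false_iff_not]
    rw [pv_mem_chips_on]
    constructor
    · rintro ⟨⟨c, hc, h2, hev, hval, rfl⟩, hnm⟩
      exact ⟨c, hc, h2, hev, by rw [hNB2 c (by omega) hc hnm]; exact hval, rfl⟩
    · rintro ⟨c, hc, h2, hev, hval, rfl⟩
      have hnm : (c : Int) ∉ M := by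
        intro hm
        rw [hNB1 c (by omega) hc hm] at hval
        exact ht hval
      exact ⟨⟨c, hc, h2, hev, by rw [hNB2 c (by omega) hc hnm] at hval; exact hval, rfl⟩, hnm⟩
  have hGT : ∀ x : Int, x ∈ pv_gens_on b t ++ M.filter (fun m => PySem.Int.mod m 2 == 1) ↔
      ∃ g : Nat, g < n ∧ g % 2 = 1 ∧ (pvNB b t M).getD g 0 = t ∧ x = (g : Int) := by
    intro x
    rw [List.mem_append, List.mem_filter, pv_mem_gens_on]
    constructor
    · rintro (⟨g, hg, hodd, hval, rfl⟩ | ⟨hm, hodd⟩)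
      · have hnm : (g : Int) ∉ M := by
          intro hmm
          exact ht (((hMk g hmm).2.2).symm.trans hval).symm
        exact ⟨g, hg, hodd, by rw [hNB2 g (by omega) hg hnm]; exact hval, rfl⟩
      · obtain ⟨k, rfl, h1, h2, h3⟩ := hM _ hm
        rw [pv_mod2_nat] at hodd
        refine ⟨k, h2, by exact_mod_cast (beq_iff_eq.mp hodd), hNB1 k h1 h2 hm, rfl⟩
    · rintro ⟨g, hg, hodd, hval, rfl⟩
      by_cases hm : (g : Int) ∈ M
      · right
        refine ⟨hm, ?_⟩
        rw [pv_mod2_nat, hodd]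
        norm_num
      · left
        exact ⟨g, hg, hodd, by rw [hNB2 g (by omega) hg hm] at hval; exact hval, rfl⟩
  have hCT : ∀ x : Int, x ∈ pv_chips_on b t ++ M.filter (fun m => PySem.Int.mod m 2 == 0) ↔
      ∃ c : Nat, c < n ∧ 2 ≤ c ∧ c % 2 = 0 ∧ (pvNB b t M).getD c 0 = t ∧ x = (c : Int) := by
    intro x
    rw [List.mem_append, List.mem_filter, pv_mem_chips_on]
    constructor
    · rintro (⟨c, hc, h2, hev, hval, rfl⟩ | ⟨hm, hev⟩)
      · have hnm : (c : Int) ∉ M := by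
          intro hmm
          exact ht (((hMk c hmm).2.2).symm.trans hval).symm
        exact ⟨c, hc, h2, hev, by rw [hNB2 c (by omega) hc hnm]; exact hval, rfl⟩
      · obtain ⟨k, rfl, h1, h2, h3⟩ := hM _ hm
        rw [pv_mod2_nat] at hev
        have : k % 2 = 0 := by exact_mod_cast (beq_iff_eq.mp hev)
        exact ⟨k, h2, by omega, this, hNB1 k h1 h2 hm, rfl⟩
    · rintro ⟨c, hc, h2, hev, hval, rfl⟩
      by_cases hm : (c : Int) ∈ M
      · right
        refine ⟨hm, ?_⟩
        rw [pv_mod2_nat, hev]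
        norm_num
      · left
        exact ⟨c, hc, h2, hev, by rw [hNB2 c (by omega) hc hm] at hval; exact hval, rfl⟩
  -- generator transfer for untouched floors
  have hD : ∀ f : Int, f ≠ floor → f ≠ t → ∀ g : Nat, g < n → 1 ≤ g →
      ((pvNB b t M).getD g 0 = f ↔ b.getD g 0 = f) := by
    intro f hf1 hf2 g hg h1
    by_cases hm : (g : Int) ∈ M
    · rw [hNB1 g h1 hg hm]
      constructor
      · intro h; exact absurd h.symm hf2
      · intro h; exact absurd ((hMk g hm).2.2 ▸ h).symm hf1
    · rw [hNB2 g h1 hg hm]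
  rw [Bool.and_eq_true, Bool.and_eq_true, List.all_eq_true, pv_ok_iff, pv_ok_iff]
  have hlen := pv_NB_length b t M
  constructor
  · rintro ⟨⟨hP1, hP2⟩, hP3⟩
    intro c hc h2 hev hgen
    rw [hlen] at hc
    obtain ⟨g, hg, hgodd, hgval⟩ := hgen
    rw [hlen] at hg
    by_cases hft : (pvNB b t M).getD c 0 = t
    · -- destination floor: checked by pv_ok gt ct
      have hgmem : ((g : Int)) ∈ pv_gens_on b t ++ M.filter (fun m => PySem.Int.mod m 2 == 1) :=
        (hGT _).mpr ⟨g, hg, hgodd, hgval.trans hft, rfl⟩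
      rcases hP3 with hnil | hall
      · rw [hnil] at hgmem; cases hgmem
      · have hcmem := (hCT _).mpr ⟨c, hc, h2, hev, hft, rfl⟩
        have := hall _ hcmem
        rw [show ((c : Int) - 1) = ((c - 1 : Nat) : Int) by omega] at this
        obtain ⟨g', hg', _, hval', hcast⟩ := (hGT _).mp this
        have : c - 1 = g' := by exact_mod_cast hcast
        rw [hft, this]
        exact hval'
    · by_cases hff : (pvNB b t M).getD c 0 = floor
      · -- source floor: checked by pv_ok gf cf
        have hgmem : ((g : Int)) ∈ (pv_gens_on b floor).filter (fun g => !M.contains g) :=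
          (hGF _).mpr ⟨g, hg, hgodd, hgval.trans hff, rfl⟩
        rcases hP2 with hnil | hall
        · rw [hnil] at hgmem; cases hgmem
        · have hcmem := (hCF _).mpr ⟨c, hc, h2, hev, hff, rfl⟩
          have := hall _ hcmem
          rw [show ((c : Int) - 1) = ((c - 1 : Nat) : Int) by omega] at this
          obtain ⟨g', hg', _, hval', hcast⟩ := (hGF _).mp this
          have : c - 1 = g' := by exact_mod_cast hcast
          rw [hff, this]
          exact hval'
      · -- untouched floor: covered by the precomputed bad_floors scan
        have hcm : (c : Int) ∉ M := fun hm => hft (hNB1 c (by omega) hc hm)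
        have hbc : b.getD c 0 = (pvNB b t M).getD c 0 := (hNB2 c (by omega) hc hcm).symm
        have hgb : b.getD g 0 = (pvNB b t M).getD c 0 :=
          (hD _ hff hft g hg (by omega)).mp hgval
        have hbne : b.getD (c - 1) 0 = b.getD c 0 := by
          by_contra hne
          have hmem : b.getD c 0 ∈ pv_bad_floors b :=
            (pv_mem_bad_floors b _).mpr
              ⟨c, hc, h2, hev, rfl, ⟨g, hg, hgodd, hgb.trans hbc.symm⟩, hne⟩
          have := hP1 _ hmem
          simp only [Bool.or_eq_true, beq_iff_eq] at this
          rcases this with h | h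
          · exact hff (hbc ▸ h)
          · exact hft (hbc ▸ h)
        have hc1m : ((c - 1 : Nat) : Int) ∉ M := by
          intro hm
          have := (hMk _ hm).2.2
          rw [hbne, hbc] at this
          exact hff this
        rw [hNB2 (c - 1) (by omega) (by omega) hc1m, hbne, hbc]
  · intro hs
    refine ⟨⟨?_, ?_⟩, ?_⟩
    · -- the bad_floors pass
      intro f hf
      obtain ⟨c, hc, h2, hev, hval, ⟨g, hg, hgodd, hgval⟩, hne⟩ := (pv_mem_bad_floors b f).mp hf
      simp only [Bool.or_eq_true, beq_iff_eq]
      by_contra hcon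
      push Not at hcon
      obtain ⟨hf1, hf2⟩ := hcon
      have hcm : (c : Int) ∉ M := fun hm => hf1 (hval ▸ (hMk _ hm).2.2 ▸ rfl)
      have hNBc : (pvNB b t M).getD c 0 = f := by rw [hNB2 c (by omega) hc hcm, hval]
      have hNBg : (pvNB b t M).getD g 0 = f :=
        (hD _ hf1 hf2 g hg (by omega)).mpr hgval
      have := hs c (by omega) h2 hev ⟨g, by omega, hgodd, hNBg.trans hNBc.symm⟩
      rw [hNBc] at this
      by_cases hm : ((c - 1 : Nat) : Int) ∈ M
      · rw [hNB1 (c - 1) (by omega) (by omega) hm] at this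
        exact hf2 this.symm
      · rw [hNB2 (c - 1) (by omega) (by omega) hm] at this
        exact hne this
    · -- the source floor
      by_cases hnil : (pv_gens_on b floor).filter (fun g => !M.contains g) = []
      · exact Or.inl hnil
      · refine Or.inr fun x hx => ?_
        obtain ⟨c, hc, h2, hev, hval, rfl⟩ := (hCF x).mp hx
        obtain ⟨y, hy⟩ := List.exists_mem_of_ne_nil _ hnil
        obtain ⟨g, hg, hgodd, hgval, rfl⟩ := (hGF y).mp hy
        have := hs c (by omega) h2 hev ⟨g, by omega, hgodd, hgval.trans hval.symm⟩
        rw [hval] at this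
        rw [show ((c : Int) - 1) = ((c - 1 : Nat) : Int) by omega]
        exact (hGF _).mpr ⟨c - 1, by omega, by omega, this, rfl⟩
    · -- the destination floor
      by_cases hnil : pv_gens_on b t ++ M.filter (fun m => PySem.Int.mod m 2 == 1) = []
      · exact Or.inl hnil
      · refine Or.inr fun x hx => ?_
        obtain ⟨c, hc, h2, hev, hval, rfl⟩ := (hCT x).mp hx
        obtain ⟨y, hy⟩ := List.exists_mem_of_ne_nil _ hnil
        obtain ⟨g, hg, hgodd, hgval, rfl⟩ := (hGT y).mp hy
        have := hs c (by omega) h2 hev ⟨g, by omega, hgodd, hgval.trans hval.symm⟩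
        rw [hval] at this
        rw [show ((c : Int) - 1) = ((c - 1 : Nat) : Int) by omega]
        exact (hGT _).mpr ⟨c - 1, by omega, by omega, this, rfl⟩

-- membership of the items-on-the-elevator-floor list shared by the two ports
theorem pv_mem_elems (b : List Int) (floor x : Int) :
    x ∈ ((PySem.List.enumerate b).filterMap fun p =>
        if p.1 > 0 && p.2 == floor then some p.1 else none) ↔
      ∃ k : Nat, k < b.length ∧ 1 ≤ k ∧ b.getD k 0 = floor ∧ x = (k : Int) := by
  simp only [List.mem_filterMap, PySem.List.mem_enumerate_iff]
  constructor
  · rintro ⟨p, ⟨k, hk, rfl⟩, hp⟩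
    simp only [zero_add] at hp
    split at hp
    · rename_i hcond
      simp only [Bool.and_eq_true, beq_iff_eq, decide_eq_true_eq] at hcond
      refine ⟨k, hk, by exact_mod_cast hcond.1, by rw [List.getD_eq_getElem _ _ hk]; exact hcond.2,
        (Option.some.inj hp).symm⟩
    · cases hp
  · rintro ⟨k, hk, h1, hval, rfl⟩
    refine ⟨((k : Int), b[k]), ⟨k, hk, by simp⟩, ?_⟩
    rw [List.getD_eq_getElem _ _ hk] at hval
    have h0 : ¬ k = 0 := by omega
    simp [hval, h0]

-- A's copy-then-assign move equals the pointwise rebuild of the emitted tuple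
theorem pv_foldl_setD_length (M : List Int) (t : Int) (b : List Int) :
    (M.foldl (fun nb e => PySem.List.pySetD nb e t) b).length = b.length := by
  induction M generalizing b with
  | nil => rfl
  | cons e rest ih => rw [List.foldl_cons, ih, PySem.List.length_pySetD]

theorem pv_foldl_setD_getD (M : List Int) (t : Int) (b : List Int)
    (hM : ∀ m ∈ M, 0 ≤ m ∧ m < b.length) (j : Nat) (hj : j < b.length) :
    (M.foldl (fun nb e => PySem.List.pySetD nb e t) b).getD j 0 =
      if (j : Int) ∈ M then t else b.getD j 0 := by
  induction M generalizing b with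
  | nil => simp
  | cons e rest ih =>
      obtain ⟨he0, hel⟩ := hM e List.mem_cons_self
      rw [List.foldl_cons]
      have hlen : (PySem.List.pySetD b e t).length = b.length := PySem.List.length_pySetD _ _ _
      rw [ih (PySem.List.pySetD b e t)
        (fun m hm => by rw [hlen]; exact hM m (List.mem_cons_of_mem _ hm)) (hlen ▸ hj)]
      have hset : (PySem.List.pySetD b e t).getD j 0 =
          if (j : Int) = e then t else b.getD j 0 := by
        rw [PySem.List.pySetD_of_nonneg b t he0,
          List.getD_eq_getElem _ _ (by rw [List.length_set]; exact hj),
          List.getElem_set, List.getD_eq_getElem _ _ hj]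
        have : e.toNat = j ↔ (j : Int) = e := by omega
        split <;> rename_i h
        · rw [if_pos (this.mp h)]
        · rw [if_neg (fun hc => h (this.mpr hc))]
      rw [hset]
      by_cases h1 : (j : Int) ∈ rest <;> by_cases h2 : (j : Int) = e <;>
        simp [List.mem_cons, h1, h2]

theorem pv_move_eq (M : List Int) (t : Int) (b : List Int)
    (hM : ∀ m ∈ M, 0 ≤ m ∧ m < b.length) :
    pv_move_to M t b = pvNB b t M := by
  unfold pv_move_to
  have hlen : (M.foldl (fun nb e => PySem.List.pySetD nb e t) b).length = b.length :=
    pv_foldl_setD_length M t b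
  apply List.ext_getElem
  · rw [PySem.List.pySetD_of_nonneg _ t (by norm_num), List.length_set, hlen, pv_NB_length]
  · intro j hl hr
    have hj : j < b.length := by rwa [pv_NB_length] at hr
    rw [← List.getD_eq_getElem _ 0 hl, ← List.getD_eq_getElem _ 0 hr,
      PySem.List.pySetD_of_nonneg _ t (by norm_num)]
    have hsl : j < (M.foldl (fun nb e => PySem.List.pySetD nb e t) b).length := hlen ▸ hj
    rw [List.getD_eq_getElem _ 0 (by rw [List.length_set]; exact hsl), List.getElem_set,
      pv_NB_getD b t M j hj]
    rcases Nat.eq_zero_or_pos j with h0 | hpos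
    · simp [h0]
    · rw [if_neg (by omega), ← List.getD_eq_getElem _ 0 hsl,
        pv_foldl_setD_getD M t b hM j hj]
      have h0 : ¬ (j = 0) := by omega
      by_cases hm : (j : Int) ∈ M <;> simp [hm, h0]

-- the peel-head pair loop enumerates exactly itertools.combinations(elems, 2)
theorem pv_pairs_eq (F : List Int → List (List Int)) (l : List Int) :
    (PySem.List.combinations l 2).flatMap F = pv_pairs_pass F l := by
  induction l with
  | nil => rw [PySem.List.combinations_nil_succ]; rfl
  | cons x xs ih =>
      rw [show (2 : Nat) = 1 + 1 from rfl, PySem.List.combinations_cons_succ,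
        PySem.List.combinations_one, List.flatMap_append, List.map_map, List.flatMap_map]
      unfold pv_pairs_pass
      rw [ih]
      rfl

theorem pv_pairs_congr (F G : List Int → List (List Int)) (l : List Int)
    (h : ∀ x ∈ l, ∀ y ∈ l, F [x, y] = G [x, y]) :
    pv_pairs_pass F l = pv_pairs_pass G l := by
  induction l with
  | nil => rfl
  | cons x xs ih =>
      unfold pv_pairs_pass
      rw [ih (fun a ha c hc => h a (List.mem_cons_of_mem _ ha) c (List.mem_cons_of_mem _ hc))]
      congr 1
      exact List.flatMap_congr (fun y hy =>
        h x List.mem_cons_self y (List.mem_cons_of_mem _ hy))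

-- per-candidate agreement: A validates the rebuilt building, B validates incrementally
theorem pv_cand_eq (b : List Int) (floor : Int) (M : List Int)
    (hM : ∀ m ∈ M, ∃ k : Nat, m = (k : Int) ∧ 1 ≤ k ∧ k < b.length ∧ b.getD k 0 = floor) :
    ((if floor > 0 then
        let nb := pv_move_to M (floor - 1) b
        if pv_building_is_valid nb then [nb] else []
      else []) ++
     (if floor < 3 then
        let nb := pv_move_to M (floor + 1) b
        if pv_building_is_valid nb then [nb] else []
      else [])) =
    pv_candidates b
      (((if floor > 0 then [floor - 1] else []) ++ (if floor < 3 then [floor + 1] else [])).map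
        fun t => (t, pv_gens_on b t, pv_chips_on b t,
          (pv_bad_floors b).all fun f => f == floor || f == t))
      (pv_gens_on b floor) (pv_chips_on b floor) M := by
  have hM' : ∀ m ∈ M, 0 ≤ m ∧ m < b.length := by
    intro m hm
    obtain ⟨k, rfl, h1, h2, _⟩ := hM m hm
    constructor <;> [positivity; exact_mod_cast h2]
  have key : ∀ t : Int, t ≠ floor →
      (if pv_building_is_valid (pv_move_to M t b) then [pv_move_to M t b] else []) =
      (if ((pv_bad_floors b).all (fun f => f == floor || f == t)
            && pv_ok ((pv_gens_on b floor).filter fun g => !M.contains g)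
                     ((pv_chips_on b floor).filter fun c => !M.contains c)
            && pv_ok (pv_gens_on b t ++ M.filter fun m => PySem.Int.mod m 2 == 1)
                     (pv_chips_on b t ++ M.filter fun m => PySem.Int.mod m 2 == 0))
        then [pvNB b t M] else []) := by
    intro t ht
    rw [pv_move_eq M t b hM']
    have hb : pv_building_is_valid (pvNB b t M) =
        ((pv_bad_floors b).all (fun f => f == floor || f == t)
          && pv_ok ((pv_gens_on b floor).filter fun g => !M.contains g)
                   ((pv_chips_on b floor).filter fun c => !M.contains c)
          && pv_ok (pv_gens_on b t ++ M.filter fun m => PySem.Int.mod m 2 == 1)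
                   (pv_chips_on b t ++ M.filter fun m => PySem.Int.mod m 2 == 0)) := by
      apply Bool.coe_iff_coe.mp
      rw [pv_valid_iff, pv_delta_valid b floor t M hM ht]
    rw [hb]
  simp only [pv_candidates]
  rw [List.map_append, List.flatMap_append]
  congr 1
  · by_cases h : floor > 0
    · simp only [if_pos h, List.map_cons, List.map_nil, List.flatMap_cons, List.flatMap_nil,
        List.append_nil]
      exact key (floor - 1) (by omega)
    · simp [if_neg h]
  · by_cases h : floor < 3
    · simp only [if_pos h, List.map_cons, List.map_nil, List.flatMap_cons, List.flatMap_nil,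
        List.append_nil]
      exact key (floor + 1) (by omega)
    · simp [if_neg h]

-- ===== VERDICT (by name: the statement is the Claim_ definition above) =====
theorem buildings_generator_spec : Claim_equal_buildings_generator := by
  intro building _ _
  unfold Spec_buildings_generator buildings_generator buildings_generator_alt
  set floor := (PySem.List.pyGet? building 0).getD 0 with hfloor
  set elems := (PySem.List.enumerate building).filterMap fun p =>
      if p.1 > 0 && p.2 == floor then some p.1 else none with helems
  have hmem : ∀ x ∈ elems, ∃ k : Nat, x = (k : Int) ∧ 1 ≤ k ∧ k < building.length ∧
      building.getD k 0 = floor := by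
    intro x hx
    obtain ⟨k, h1, h2, h3, rfl⟩ := (pv_mem_elems building floor x).mp hx
    exact ⟨k, rfl, h2, h1, h3⟩
  rw [List.flatMap_append, PySem.List.combinations_one, List.flatMap_map, pv_pairs_eq]
  congr 1
  · apply List.flatMap_congr
    intro x hx
    exact pv_cand_eq building floor [x] (by
      intro m hm
      rw [List.mem_singleton] at hm
      subst hm
      obtain ⟨k, rfl, h⟩ := hmem m hx
      exact ⟨k, rfl, h⟩)
  · apply pv_pairs_congr
    intro x hx y hy
    exact pv_cand_eq building floor [x, y] (by
      intro m hm
      rcases List.mem_pair.mp hm with rfl | rfl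
      · obtain ⟨k, rfl, h⟩ := hmem m hx
        exact ⟨k, rfl, h⟩
      · obtain ⟨k, rfl, h⟩ := hmem m hy
        exact ⟨k, rfl, h⟩)
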